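-- pv_equiv track=rewrite | github.com/DaJMaN4/Discord-Bot-Tero | TeroBotEN.py | reload
-- ===== SOURCE A (Python) =====
-- def reload(data):
--     lenght = len(data)
--     number = 0
--     value = 0
--     newData = {}
--     while number != lenght:
--         h = data.get(value)
--         if h != None:
--             newData[number] = h
--             number += 1
--         value += 1
--     return newData
-- ===== SOURCE B (Python) =====
-- def reload(data):
--     newData = {}
--     for i, k in enumerate(sorted(data)):
--         newData[i] = data[k]
--     return newData
-- ===== Notes on version B (the rewrite author's own statement) =====
-- stated objective: faster
-- what changed: A scans candidate keys 0,1,2,... until it has seen len(data) hits (O(max key) probes); B just sorts the actual keys and assigns sequential indices in one enumerate pass, never probing absent keys.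
-- outside the precondition, e.g. on reload({-1: 5}): A does not finish within the time limit, B returns {0: 5}
import Mathlib
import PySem

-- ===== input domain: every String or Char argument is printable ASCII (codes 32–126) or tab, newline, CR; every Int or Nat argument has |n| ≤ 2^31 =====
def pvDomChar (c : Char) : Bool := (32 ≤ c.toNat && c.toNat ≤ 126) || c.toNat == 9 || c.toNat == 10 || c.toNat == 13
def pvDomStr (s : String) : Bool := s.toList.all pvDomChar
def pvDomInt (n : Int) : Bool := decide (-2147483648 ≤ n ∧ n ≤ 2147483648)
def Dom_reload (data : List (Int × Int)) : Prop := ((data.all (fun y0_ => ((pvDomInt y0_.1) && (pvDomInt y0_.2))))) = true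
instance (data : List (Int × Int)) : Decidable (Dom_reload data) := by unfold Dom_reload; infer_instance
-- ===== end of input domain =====

-- B replaces A's scan of candidate keys 0,1,2,... with one pass over the sorted actual keys (objective: faster).

-- ===== PORT A =====
-- the while loop: condition checked first, 'value' always advanced; 'fuel' is only a
-- totalization guard — under Pre_ (all keys ≥ 0) max-key+1 iterations always suffice
def reloadLoop (d : PySem.Dict Int Int) (lenght : Int) :
    Nat → Int → Int → PySem.Dict Int Int → PySem.Dict Int Int
  | 0, _, _, newData => newData
  | fuel + 1, number, value, newData =>
    if number ≠ lenght then
      match d.get? value with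
      | some h => reloadLoop d lenght fuel (number + 1) (value + 1) (newData.insert number h)
      | none => reloadLoop d lenght fuel number (value + 1) newData
    else newData

def reload (data : List (Int × Int)) : List (Int × Int) :=
  let d : PySem.Dict Int Int := PySem.Dict.ofList data
  let lenght : Int := (d.size : Int)
  (reloadLoop d lenght ((d.keys.foldl max 0).toNat + 1) 0 0 PySem.Dict.empty).items

-- ===== PORT B =====
def reload_alt (data : List (Int × Int)) : List (Int × Int) :=
  let d : PySem.Dict Int Int := PySem.Dict.ofList data
  -- data[k] with k drawn from d's own keys: get? is always some; getD 0 only totalizes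
  (PySem.List.enumerate (PySem.List.sorted d.keys (fun k => k))).map
    (fun p => (p.1, (d.get? p.2).getD 0))

-- ===== PRECONDITION & SPEC =====
-- Pre_ excludes dicts with a negative key: A's while loop scans values 0,1,2,... and
-- never finds such a key, so A does not terminate there (B returns normally).
def Pre_reload (data : List (Int × Int)) : Prop := ∀ p ∈ data, 0 ≤ p.1
instance (data : List (Int × Int)) : Decidable (Pre_reload data) := by unfold Pre_reload; infer_instance
def pvWitness_reload : (List (Int × Int)) := [(2, 7), (0, -3), (5, 1)]
def Spec_reload (data : List (Int × Int)) (out : List (Int × Int)) : Prop := out = reload_alt data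
instance (data : List (Int × Int)) (out : List (Int × Int)) : Decidable (Spec_reload data out) := by unfold Spec_reload; infer_instance

-- ===== CLAIM (what is proved, stated in full; the proofs are below) =====
def Claim_equal_reload : Prop := ∀ (data : List (Int × Int)), Dom_reload data → Pre_reload data → Spec_reload data (reload data)

-- ===== LEMMAS AND PROOFS =====

-- keys of a dict built from an association list are the listed keys
theorem mem_keys_ofList (data : List (Int × Int)) (k : Int) :
    k ∈ (PySem.Dict.ofList data).keys ↔ k ∈ data.map (·.1) := by
  show k ∈ (data.foldl (fun acc p => acc.insert p.1 p.2) PySem.Dict.empty).keys ↔ _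
  rw [PySem.Dict.keys_foldl_insert_key]
  simp [PySem.Set.mem_update, PySem.Dict.keys_empty]

-- the loop invariant: with S the (strictly increasing) list of still-unseen keys ≥ value,
-- enough fuel to reach them all, and newData holding keys < number, the loop appends the
-- entries of S with sequential indices starting at number.
theorem reloadLoop_spec (d : PySem.Dict Int Int) (fuel : Nat) :
    ∀ (number value : Int) (newData : PySem.Dict Int Int) (S : List Int),
    (∀ k : Int, k ∈ S ↔ k ∈ d.keys ∧ value ≤ k) →
    S.Pairwise (· < ·) →
    (∀ k ∈ S, k < value + fuel) →
    (∀ k ∈ newData.keys, k < number) →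
    newData.keys.Nodup →
    (reloadLoop d (number + (S.length : Int)) fuel number value newData).items
      = newData.items ++ (PySem.List.enumerate S number).map (fun p => (p.1, (d.get? p.2).getD 0)) := by
  induction fuel with
  | zero =>
    intro number value newData S hmem hpw hfuel _ _
    have hS : S = [] := by
      cases S with
      | nil => rfl
      | cons s t =>
        have h1 := (hmem s).mp (by simp)
        have h2 := hfuel s (by simp)
        omega
    subst hS
    simp [reloadLoop, PySem.List.enumerate]
  | succ fuel ih =>
    intro number value newData S hmem hpw hfuel hnd hndn
    cases S with
    | nil =>
      simp [reloadLoop, PySem.List.enumerate]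
    | cons s t =>
      have hcond : number ≠ number + ((s :: t).length : Int) := by
        simp; omega
      rcases hget : d.get? value with _ | hv
      · -- value not a key: same S, value+1
        have hnk : value ∉ d.keys := (PySem.Dict.get?_eq_none_iff_not_mem_keys d value).mp hget
        have := ih number (value + 1) newData (s :: t)
          (by
            intro k
            constructor
            · intro hk
              rcases (hmem k).mp hk with ⟨h1, h2⟩
              refine ⟨h1, ?_⟩
              rcases eq_or_lt_of_le h2 with h | h
              · exact absurd (h ▸ h1) hnk
              · omega
            · intro ⟨h1, h2⟩
              exact (hmem k).mpr ⟨h1, by omega⟩)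
          hpw
          (by intro k hk; have := hfuel k hk; omega)
          hnd hndn
        simpa [reloadLoop, hcond, hget] using this
      · -- value is a key: it must be the head s
        have hk : value ∈ d.keys := by
          by_contra h
          rw [← PySem.Dict.get?_eq_none_iff_not_mem_keys d value] at h
          simp [h] at hget
        have hvS : value ∈ s :: t := (hmem value).mpr ⟨hk, le_refl _⟩
        have hsv : s = value := by
          rcases List.mem_cons.mp hvS with h | hvt
          · exact h.symm
          · have h1 := (List.pairwise_cons.mp hpw).1 value hvt
            have h2 := ((hmem s).mp (by simp)).2
            omega
        subst hsv
        have hfresh : newData.contains number = false := by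
          by_contra h
          have : number ∈ newData.keys :=
            (PySem.Dict.contains_iff_mem_keys newData number).mp (by
              cases hcc : newData.contains number
              · exact absurd hcc h
              · rfl)
          have := hnd number this
          omega
        have := ih (number + 1) (s + 1) (newData.insert number hv) t
          (by
            intro k
            constructor
            · intro hk'
              have hmk := (hmem k).mp (by simp [hk'])
              have hlt := (List.pairwise_cons.mp hpw).1 k hk'
              exact ⟨hmk.1, by omega⟩
            · intro ⟨h1, h2⟩
              have := (hmem k).mpr ⟨h1, by omega⟩
              rcases List.mem_cons.mp this with h | h
              · omega
              · exact h)
          (List.pairwise_cons.mp hpw).2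
          (by intro k hk'; have := hfuel k (by simp [hk']); omega)
          (by
            intro k hk'
            rcases (PySem.Dict.mem_keys_insert newData number k hv).mp hk' with h | h
            · omega
            · have := hnd k h; omega)
          (PySem.Dict.nodup_keys_insert newData number hv hndn)
        rw [show number + ((s :: t).length : Int) = (number + 1) + (t.length : Int) by simp; omega]
        rw [reloadLoop, if_pos (by omega : number ≠ number + 1 + (t.length : Int)), hget]
        rw [this]
        rw [PySem.Dict.items_insert_of_not_contains newData hv hfresh]
        simp [PySem.List.enumerate_cons, hget]

-- ===== VERDICT (by name: the statement is the Claim_ definition above) =====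
theorem reload_spec : Claim_equal_reload := by
  intro data _ hpre
  show (reloadLoop (PySem.Dict.ofList data) (((PySem.Dict.ofList data).size : Nat) : Int)
      (((PySem.Dict.ofList data).keys.foldl max 0).toNat + 1) 0 0 PySem.Dict.empty).items
    = (PySem.List.enumerate (PySem.List.sorted (PySem.Dict.ofList data).keys (fun k => k))).map
        (fun p => (p.1, ((PySem.Dict.ofList data).get? p.2).getD 0))
  set d : PySem.Dict Int Int := PySem.Dict.ofList data with hd
  set S : List Int := PySem.List.sorted d.keys (fun k => k) with hS
  have hkeys_nonneg : ∀ k ∈ d.keys, (0 : Int) ≤ k := by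
    intro k hk
    rcases List.mem_map.mp ((mem_keys_ofList data k).mp hk) with ⟨p, hp, hpk⟩
    exact hpk ▸ hpre p hp
  have hmemS : ∀ k : Int, k ∈ S ↔ k ∈ d.keys ∧ (0 : Int) ≤ k := by
    intro k
    rw [hS, PySem.List.mem_sorted]
    exact ⟨fun h => ⟨h, hkeys_nonneg k h⟩, fun h => h.1⟩
  have hpw : S.Pairwise (· < ·) := by
    have h1 : S.Pairwise (fun a b => a ≤ b) := PySem.List.sorted_pairwise d.keys (fun k => k)
    have hnd : S.Nodup := ((PySem.List.sorted_perm d.keys (fun k => k) false).nodup_iff).mpr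
      (PySem.Dict.nodup_keys_ofList data)
    exact h1.imp₂ (fun a b hab hne => lt_of_le_of_ne hab hne) hnd
  have hlen : ((d.size : Nat) : Int) = (0 : Int) + (S.length : Int) := by
    have : S.length = d.keys.length := (PySem.List.sorted_perm d.keys (fun k => k) false).length_eq
    simp [this, PySem.Dict.size, PySem.Dict.keys]
  rw [hlen]
  rw [reloadLoop_spec d ((d.keys.foldl max 0).toNat + 1) 0 0 PySem.Dict.empty S
    hmemS hpw
    (by
      intro k hk
      have hle := (PySem.List.le_foldl_max d.keys 0).2 k ((hmemS k).mp hk).1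
      have h0 : (0:Int) ≤ d.keys.foldl max 0 := (PySem.List.le_foldl_max d.keys 0).1
      omega)
    (by intro k hk; simp [PySem.Dict.keys_empty] at hk)
    (by simp [PySem.Dict.keys_empty])]
  simp [PySem.Dict.empty]
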